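-- pv_equiv track=rewrite | github.com/AnjinkLaCoding/BioInformatics | SkewDiagramCandGDiff.py | SkewDia
-- ===== SOURCE A (Python) =====
-- def SkewDia(text):
--     res = []
--     Diff = 0
--     for i in range(len(text)):
--         res += [str(Diff)]
--         if text[i]=='C':
--             Diff -= 1
--         elif text[i]=='G':
--             Diff += 1
--     res += [str(Diff)]
--     return ' '.join(res)
-- ===== SOURCE B (Python) =====
-- def _skew(t):
--     # divide and conquer: prefix-skew of l+r = skew(l) followed by skew(r) shifted by skew(l)'s last value
--     if len(t) <= 1:
--         return [0, 1 if t == 'G' else -1 if t == 'C' else 0] if t else [0]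
--     mid = len(t) // 2
--     left = _skew(t[:mid])
--     right = _skew(t[mid:])
--     off = left[-1]
--     return left + [off + v for v in right[1:]]
--
-- def SkewDia(text):
--     return ' '.join(map(str, _skew(text)))
-- ===== Notes on version B (the rewrite author's own statement) =====
-- stated objective: alternative
-- what changed: A builds the skew values in one left-to-right running-sum loop; B computes them by divide and conquer, recursively halving the string and merging the two half-diagrams by shifting the right half by the left half's final skew, then joining.
import Mathlib
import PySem

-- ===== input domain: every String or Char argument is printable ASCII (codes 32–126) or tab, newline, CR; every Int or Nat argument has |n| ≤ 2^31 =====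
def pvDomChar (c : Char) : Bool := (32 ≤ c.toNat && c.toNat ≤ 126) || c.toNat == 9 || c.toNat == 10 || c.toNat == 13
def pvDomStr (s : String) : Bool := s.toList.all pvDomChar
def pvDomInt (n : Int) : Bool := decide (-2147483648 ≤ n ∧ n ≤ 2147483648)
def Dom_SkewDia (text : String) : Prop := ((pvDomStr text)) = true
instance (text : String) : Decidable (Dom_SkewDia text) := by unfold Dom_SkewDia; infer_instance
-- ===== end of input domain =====

-- B replaces A's single running-sum loop by a divide-and-conquer merge of half-diagrams (alternative decomposition, same result).

-- ===== PORT A =====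
-- loop body: res += [str(Diff)]; if text[i]=='C': Diff -= 1 elif text[i]=='G': Diff += 1
def pvStepA (st : List String × Int) (c : Char) : List String × Int :=
  let res := st.1 ++ [PySem.Int.toStr st.2]
  let Diff := if c = 'C' then st.2 - 1 else if c = 'G' then st.2 + 1 else st.2
  (res, Diff)

def SkewDia (text : String) : String :=
  let st := text.toList.foldl pvStepA ([], 0)
  PySem.Str.join " " (st.1 ++ [PySem.Int.toStr st.2])

-- ===== PORT B =====
-- '1 if t == 'G' else -1 if t == 'C' else 0' on the single character
def pvInc (c : Char) : Int := if c = 'G' then 1 else if c = 'C' then -1 else 0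

-- _skew: divide and conquer; left[-1] is ported as getLastD 0 (left is provably nonempty)
def pvSkew (t : List Char) : List Int :=
  if h : t.length ≤ 1 then
    match t with
    | [] => [0]
    | c :: _ => [0, pvInc c]
  else
    let mid := t.length / 2
    let left := pvSkew (t.take mid)
    let right := pvSkew (t.drop mid)
    let off := left.getLastD 0
    left ++ (right.drop 1).map (fun v => off + v)
termination_by t.length
decreasing_by
  · simp only [List.length_take]; omega
  · simp only [List.length_drop]; omega

def SkewDia_alt (text : String) : String :=
  PySem.Str.join " " ((pvSkew text.toList).map (fun v => PySem.Int.toStr v))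

-- ===== PRECONDITION & SPEC =====
def Spec_SkewDia (text : String) (out : String) : Prop := out = SkewDia_alt text
instance (text : String) (out : String) : Decidable (Spec_SkewDia text out) := by unfold Spec_SkewDia; infer_instance

-- ===== CLAIM (what is proved, stated in full; the proofs are below) =====
def Claim_equal_SkewDia : Prop := ∀ (text : String), Dom_SkewDia text → Spec_SkewDia text (SkewDia text)

-- ===== LEMMAS AND PROOFS =====

-- the prefix-skew list starting at D
def pvPre (D : Int) : List Char → List Int
  | [] => [D]
  | c :: cs => D :: pvPre (D + pvInc c) cs

def pvSum (l : List Char) : Int := (l.map pvInc).sum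

theorem pvPre_last (l : List Char) : ∀ (D d : Int), (pvPre D l).getLastD d = D + pvSum l := by
  induction l with
  | nil => intro D d; simp [pvPre, pvSum]
  | cons c cs ih =>
      intro D d
      simp only [pvPre, List.getLastD_cons, ih (D + pvInc c) D, pvSum, List.map_cons,
        List.sum_cons]
      ring

theorem pvPre_shift (r : List Char) : ∀ (off D : Int),
    (pvPre D r).map (fun v => off + v) = pvPre (off + D) r := by
  induction r with
  | nil => intro off D; simp [pvPre]
  | cons c cs ih =>
      intro off D
      simp only [pvPre, List.map_cons, ih]
      rw [add_assoc]

theorem pvPre_append (l r : List Char) : ∀ D : Int,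
    pvPre D (l ++ r) = pvPre D l ++ (pvPre (D + pvSum l) r).drop 1 := by
  induction l with
  | nil =>
      intro D
      cases r <;> simp [pvPre, pvSum]
  | cons c cs ih =>
      intro D
      simp only [List.cons_append, pvPre]
      rw [ih (D + pvInc c)]
      simp [pvSum, add_assoc]

theorem pvMapDrop1 {f : Int → Int} (l : List Int) :
    List.map f (List.drop 1 l) = List.drop 1 (List.map f l) := by
  cases l <;> simp

theorem pvSkew_eq_aux (n : Nat) : ∀ t : List Char, t.length ≤ n → pvSkew t = pvPre 0 t := by
  induction n with
  | zero =>
      intro t ht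
      have : t = [] := List.eq_nil_of_length_eq_zero (Nat.le_zero.mp ht)
      subst this
      simp [pvSkew, pvPre]
  | succ n ih =>
      intro t ht
      by_cases h1 : t.length ≤ 1
      · match t with
        | [] => simp [pvSkew, pvPre]
        | [c] => simp [pvSkew, pvPre]
        | _ :: _ :: _ => simp at h1
      · rw [pvSkew, dif_neg h1]
        show pvSkew (List.take (t.length / 2) t) ++
            List.map (fun v => (pvSkew (List.take (t.length / 2) t)).getLastD 0 + v)
              (List.drop 1 (pvSkew (List.drop (t.length / 2) t))) = pvPre 0 t
        have hmid1 : 1 ≤ t.length / 2 := by omega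
        have hmid2 : t.length / 2 < t.length := by omega
        rw [ih (t.take (t.length / 2)) (by simp [List.length_take]; omega),
            ih (t.drop (t.length / 2)) (by simp [List.length_drop]; omega)]
        rw [pvPre_last, pvMapDrop1, pvPre_shift]
        simp only [add_zero, zero_add]
        have := pvPre_append (t.take (t.length / 2)) (t.drop (t.length / 2)) 0
        rw [List.take_append_drop] at this
        simp only [zero_add] at this
        rw [← this]

theorem pvSkew_eq (t : List Char) : pvSkew t = pvPre 0 t :=
  pvSkew_eq_aux t.length t (le_refl _)

-- A's loop output with the trailing str(Diff) equals the stringified prefix-skew list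
theorem pvA (cs : List Char) : ∀ (res : List String) (D : Int),
    (cs.foldl pvStepA (res, D)).1 ++ [PySem.Int.toStr (cs.foldl pvStepA (res, D)).2]
      = res ++ (pvPre D cs).map (fun v => PySem.Int.toStr v) := by
  induction cs with
  | nil => intro res D; simp [pvPre]
  | cons c cs ih =>
      intro res D
      have hinc : (if c = 'C' then D - 1 else if c = 'G' then D + 1 else D) = D + pvInc c := by
        unfold pvInc
        by_cases hC : c = 'C' <;> by_cases hG : c = 'G' <;> simp_all <;> omega
      simp only [List.foldl_cons, pvStepA, hinc, pvPre, List.map_cons]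
      rw [ih (res ++ [PySem.Int.toStr D]) (D + pvInc c)]
      simp

-- ===== VERDICT (by name: the statement is the Claim_ definition above) =====
theorem SkewDia_spec : Claim_equal_SkewDia := by
  intro text _
  show SkewDia text = SkewDia_alt text
  show PySem.Str.join " " ((List.foldl pvStepA ([], 0) text.toList).1 ++
        [PySem.Int.toStr (List.foldl pvStepA ([], 0) text.toList).2])
      = PySem.Str.join " " ((pvSkew text.toList).map (fun v => PySem.Int.toStr v))
  rw [pvSkew_eq, pvA text.toList [] 0]
  simp
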